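-- pv_equiv track=rewrite | github.com/heerucan/PS | PRG/모의고사.py | solution
-- ===== SOURCE A (Python) =====
-- def solution(answers):
--     total = {1: 0, 2: 0, 3: 0}
--
--     one = [1,2,3,4,5]*2000
--     two = [2,1,2,3,2,4,2,5]*1300
--     three = [3,3,1,1,2,2,4,4,5,5]*1000
--
--     for i in range(len(answers)):
--         answer = answers[i]
--         if one[i] == answer:
--             total[1] += 1
--         if two[i] == answer:
--             total[2] += 1
--         if three[i] == answer:
--             total[3] += 1
--
--     # 딕셔너리를 정렬
--     answer = []
--     sortedTotal = dict(sorted(total.items()))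
--
--     k = max([sortedTotal[1], sortedTotal[2], sortedTotal[3]])
--
--     if k == sortedTotal[1]:
--         answer.append(1)
--     if k == sortedTotal[2]:
--         answer.append(2)
--     if k == sortedTotal[3]:
--         answer.append(3)
--
--     return answer
-- ===== SOURCE B (Python) =====
-- def solution(answers):
--     # Histogram of (index mod 40, answer) pairs: 40 = lcm of the three cycle
--     # lengths, so a pattern's score is a sum of 40 histogram lookups.
--     hist = {}
--     for i, a in enumerate(answers):
--         key = (i % 40, a)
--         hist[key] = hist.get(key, 0) + 1
--     pats = [[1, 2, 3, 4, 5], [2, 1, 2, 3, 2, 4, 2, 5], [3, 3, 1, 1, 2, 2, 4, 4, 5, 5]]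
--     scores = [sum(hist.get((r, p[r % len(p)]), 0) for r in range(40)) for p in pats]
--     k = max(scores)
--     return [j + 1 for j in range(3) if scores[j] == k]
-- ===== Notes on version B (the rewrite author's own statement) =====
-- stated objective: alternative
-- what changed: B replaces A's three 10000-element precomputed pattern lists and single interleaved per-answer tally loop by building one histogram of (index mod 40, answer) pairs (40 = lcm of the three cycle lengths) and computing each pattern's score as a sum of 40 histogram lookups, then selecting the arg-max indices.
import Mathlib
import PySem

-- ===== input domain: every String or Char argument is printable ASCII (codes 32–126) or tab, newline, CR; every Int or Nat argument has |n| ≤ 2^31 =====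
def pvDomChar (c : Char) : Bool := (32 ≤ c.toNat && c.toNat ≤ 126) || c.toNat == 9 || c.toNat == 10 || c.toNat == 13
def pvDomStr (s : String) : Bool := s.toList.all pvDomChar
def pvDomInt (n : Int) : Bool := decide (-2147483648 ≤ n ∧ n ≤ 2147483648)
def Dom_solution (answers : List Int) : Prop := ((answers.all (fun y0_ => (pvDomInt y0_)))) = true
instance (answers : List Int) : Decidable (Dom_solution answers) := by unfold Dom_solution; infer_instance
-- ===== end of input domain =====

-- B replaces A's three precomputed 10000-element pattern lists and interleaved tally loop by one
-- histogram of (index mod 40, answer) pairs (40 = lcm of the cycle lengths); each pattern's score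
-- is then a sum of 40 histogram lookups, independent of the number of answers (objective: alternative).

-- ===== PORT A =====
-- body of A's for-loop: the three 'if pattern[i] == answer: total[j] += 1' statements
def tallyStep (one two three : List Int) (t : PySem.Dict Int Int) (i answer : Int) : PySem.Dict Int Int :=
  let t1 := if PySem.List.pyGetD one i 0 = answer then t.modify 1 0 (· + 1) else t
  let t2 := if PySem.List.pyGetD two i 0 = answer then t1.modify 2 0 (· + 1) else t1
  if PySem.List.pyGetD three i 0 = answer then t2.modify 3 0 (· + 1) else t2

def solution (answers : List Int) : List Int :=
  let total0 : PySem.Dict Int Int := ((PySem.Dict.empty.insert 1 0).insert 2 0).insert 3 0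
  let one : List Int := PySem.List.pyRepeat [1,2,3,4,5] 2000
  let two : List Int := PySem.List.pyRepeat [2,1,2,3,2,4,2,5] 1300
  let three : List Int := PySem.List.pyRepeat [3,3,1,1,2,2,4,4,5,5] 1000
  let total := (PySem.List.pyRange 0 (PySem.List.len answers) 1).foldl
    (fun t i => tallyStep one two three t i (PySem.List.pyGetD answers i 0)) total0
  let sortedTotal := PySem.Dict.ofList (PySem.List.sorted2 total.items (·.1) (·.2))
  let k := (PySem.List.max? [sortedTotal.getD 1 0, sortedTotal.getD 2 0, sortedTotal.getD 3 0] (fun x => x)).getD 0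
  let ans : List Int := []
  let ans := if k = sortedTotal.getD 1 0 then ans ++ [1] else ans
  let ans := if k = sortedTotal.getD 2 0 then ans ++ [2] else ans
  if k = sortedTotal.getD 3 0 then ans ++ [3] else ans

-- ===== PORT B =====
-- the histogram loop: hist[(i % 40, a)] = hist.get((i % 40, a), 0) + 1
def histOf (answers : List Int) : PySem.Dict (Int × Int) Int :=
  (PySem.List.enumerate answers).foldl
    (fun d ia => d.modify (PySem.Int.mod ia.1 40, ia.2) 0 (· + 1)) PySem.Dict.empty

-- sum(hist.get((r, p[r % len(p)]), 0) for r in range(40))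
def scoreOf (hist : PySem.Dict (Int × Int) Int) (p : List Int) : Int :=
  (PySem.List.pyRange 0 40 1).foldl
    (fun s r => s + hist.getD (r, PySem.List.pyGetD p (PySem.Int.mod r (PySem.List.len p)) 0) 0) 0

def solution_alt (answers : List Int) : List Int :=
  let hist := histOf answers
  let pats : List (List Int) := [[1,2,3,4,5], [2,1,2,3,2,4,2,5], [3,3,1,1,2,2,4,4,5,5]]
  let scores := pats.map (scoreOf hist)
  let k := (PySem.List.max? scores (fun x => x)).getD 0
  ((PySem.List.pyRange 0 3 1).filter
    (fun j => decide (PySem.List.pyGetD scores j 0 = k))).map (fun j => j + 1)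

-- ===== PRECONDITION & SPEC =====
-- Pre_ excludes exactly the inputs on which A raises IndexError: more than 10000 answers,
-- i.e. indices past the end of A's precomputed pattern lists.
def Pre_solution (answers : List Int) : Prop := answers.length ≤ 10000
instance (answers : List Int) : Decidable (Pre_solution answers) := by unfold Pre_solution; infer_instance
def pvWitness_solution : List Int := [1, 3, 2, 4, 2]

def Spec_solution (answers : List Int) (out : List Int) : Prop := out = solution_alt answers
instance (answers : List Int) (out : List Int) : Decidable (Spec_solution answers out) := by unfold Spec_solution; infer_instance

-- ===== CLAIM (what is proved, stated in full; the proofs are below) =====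
def Claim_equal_solution : Prop := ∀ (answers : List Int), Dom_solution answers → Pre_solution answers → Spec_solution answers (solution answers)

-- ===== LEMMAS AND PROOFS =====

theorem flat_getD (p : List Int) (k : Nat) : ∀ (i : Nat), i < k * p.length →
    ((List.replicate k p).flatten).getD i 0 = p.getD (i % p.length) 0 := by
  induction k with
  | zero => intro i h; omega
  | succ k ih =>
    intro i h
    have hmul : (k+1) * p.length = k * p.length + p.length := by ring
    rw [List.replicate_succ, List.flatten_cons]
    by_cases hi : i < p.length
    · rw [List.getD_append _ _ _ _ hi, Nat.mod_eq_of_lt hi]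
    · rw [List.getD_append_right _ _ _ _ (by omega), Nat.mod_eq_sub_mod (by omega)]
      exact ih (i - p.length) (by omega)

-- pattern lookup in A's repeated list = modular lookup in the base cycle
theorem pat_lookup (p : List Int) (reps : Int) (s : Nat)
    (h : s < (reps.toNat) * p.length) :
    PySem.List.pyGetD (PySem.List.pyRepeat p reps) (s : Int) 0
      = PySem.List.pyGetD p (PySem.Int.mod (s : Int) (PySem.List.len p)) 0 := by
  rw [PySem.List.len_eq, show ((p.length : Int)) = ((p.length : Nat) : Int) from rfl,
    PySem.Int.mod_natCast]
  rw [PySem.List.pyGetD_natCast, PySem.List.pyGetD_natCast, PySem.List.pyRepeat]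
  exact flat_getD p reps.toNat s h

-- how many of the answers starting at position s the base cycle p matches
def cnt (p : List Int) (s : Int) (xs : List Int) : Int :=
  ((PySem.List.enumerate xs s).countP
    (fun ia => decide (PySem.List.pyGetD p (PySem.Int.mod ia.1 (PySem.List.len p)) 0 = ia.2)) : Nat)

theorem cnt_nil (p : List Int) (s : Int) : cnt p s [] = 0 := rfl

theorem cnt_cons (p : List Int) (s : Int) (x : Int) (xs : List Int) :
    cnt p s (x :: xs)
      = (if PySem.List.pyGetD p (PySem.Int.mod s (PySem.List.len p)) 0 = x then 1 else 0)
        + cnt p (s + 1) xs := by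
  unfold cnt
  rw [PySem.List.enumerate_cons, List.countP_cons]
  by_cases h : PySem.List.pyGetD p (PySem.Int.mod s (PySem.List.len p)) 0 = x <;>
    simp <;> omega

theorem modd1 (a b c : Int) : (PySem.Dict.mk [((1:Int),a),(2,b),(3,c)]).modify 1 0 (· + 1) = PySem.Dict.mk [(1,a+1),(2,b),(3,c)] := rfl
theorem modd2 (a b c : Int) : (PySem.Dict.mk [((1:Int),a),(2,b),(3,c)]).modify 2 0 (· + 1) = PySem.Dict.mk [(1,a),(2,b+1),(3,c)] := rfl
theorem modd3 (a b c : Int) : (PySem.Dict.mk [((1:Int),a),(2,b),(3,c)]).modify 3 0 (· + 1) = PySem.Dict.mk [(1,a),(2,b),(3,c+1)] := rfl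

theorem tallyStep_dict (one two three : List Int) (i x a b c : Int) :
    tallyStep one two three (PySem.Dict.mk [(1,a),(2,b),(3,c)]) i x
      = PySem.Dict.mk [(1, a + if PySem.List.pyGetD one i 0 = x then 1 else 0),
                       (2, b + if PySem.List.pyGetD two i 0 = x then 1 else 0),
                       (3, c + if PySem.List.pyGetD three i 0 = x then 1 else 0)] := by
  unfold tallyStep
  split_ifs with h1 h2 h3 <;> simp [modd1, modd2, modd3]

-- A's tally loop, over the enumerated answers, computes the three modular scores
theorem loopA (xs : List Int) : ∀ (s : Nat) (a b c : Int), s + xs.length ≤ 10000 →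
    (PySem.List.enumerate xs (s : Int)).foldl
      (fun t ia => tallyStep (PySem.List.pyRepeat [1,2,3,4,5] 2000)
        (PySem.List.pyRepeat [2,1,2,3,2,4,2,5] 1300)
        (PySem.List.pyRepeat [3,3,1,1,2,2,4,4,5,5] 1000) t ia.1 ia.2)
      (PySem.Dict.mk [(1, a), (2, b), (3, c)])
    = PySem.Dict.mk [(1, a + cnt [1,2,3,4,5] (s : Int) xs),
                     (2, b + cnt [2,1,2,3,2,4,2,5] (s : Int) xs),
                     (3, c + cnt [3,3,1,1,2,2,4,4,5,5] (s : Int) xs)] := by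
  induction xs with
  | nil => intro s a b c h; simp [PySem.List.enumerate_nil, cnt_nil]
  | cons x rest ih =>
    intro s a b c h
    simp only [List.length_cons] at h
    rw [PySem.List.enumerate_cons, List.foldl_cons]
    have hc : ((s : Int) + 1) = ((s + 1 : Nat) : Int) := by push_cast; ring
    rw [cnt_cons, cnt_cons, cnt_cons, hc]
    simp only [tallyStep_dict]
    rw [pat_lookup [1,2,3,4,5] 2000 s (by norm_num; omega),
      pat_lookup [2,1,2,3,2,4,2,5] 1300 s (by norm_num; omega),
      pat_lookup [3,3,1,1,2,2,4,4,5,5] 1000 s (by norm_num; omega)]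
    rw [ih (s+1) _ _ _ (by omega)]
    ring_nf

-- ===== B-side lemmas =====

-- the histogram lookup is a countP over the enumerated answers
theorem hist_getD (answers : List Int) (x : Int × Int) :
    (histOf answers).getD x 0
      = ((PySem.List.enumerate answers).countP
          (fun ia => (PySem.Int.mod ia.1 40, ia.2) == x) : Nat) := by
  unfold histOf
  rw [← List.foldl_map (f := fun ia : Int × Int => (PySem.Int.mod ia.1 40, ia.2))
      (g := fun (d : PySem.Dict (Int × Int) Int) k => d.modify k 0 (· + 1)),
    PySem.Dict.getD_foldl_modify_add_one, List.count_eq_countP, List.countP_map]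
  rw [show PySem.Dict.empty.getD x (0:Int) = 0 from rfl, zero_add]
  rfl

theorem sum_ind_zero (R : List Int) (v : Int → Int) (m y : Int) (hm : m ∉ R) :
    (R.map (fun r => if ((m, y) : Int × Int) = (r, v r) then (1:Int) else 0)).sum = 0 := by
  apply List.sum_eq_zero
  intro z hz
  rcases List.mem_map.1 hz with ⟨r, hr, rfl⟩
  have hne : ¬ ((m, y) : Int × Int) = (r, v r) := by
    intro h
    rw [Prod.mk.injEq] at h
    exact hm (h.1 ▸ hr)
  simp [hne]

theorem sum_ind (R : List Int) (v : Int → Int) (m y : Int) (hnd : R.Nodup) (hm : m ∈ R) :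
    (R.map (fun r => if ((m, y) : Int × Int) = (r, v r) then (1:Int) else 0)).sum
      = if y = v m then 1 else 0 := by
  induction R with
  | nil => cases hm
  | cons r R ih =>
    rw [List.map_cons, List.sum_cons]
    rcases List.nodup_cons.1 hnd with ⟨hr, hnd'⟩
    by_cases hrm : r = m
    · subst hrm
      rw [sum_ind_zero R v r y hr, add_zero]
      by_cases hy : y = v r
      · simp [hy]
      · have hne : ¬ ((r, y) : Int × Int) = (r, v r) := by
          intro h; rw [Prod.mk.injEq] at h; exact hy h.2
        simp [hne, hy]
    · have hm' : m ∈ R := by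
        cases List.mem_cons.1 hm with
        | inl h => exact absurd h.symm hrm
        | inr h => exact h
      have hne : ¬ ((m, y) : Int × Int) = (r, v r) := by
        intro h; rw [Prod.mk.injEq] at h; exact hrm h.1.symm
      rw [ih hnd' hm']
      simp [hne]

theorem mod40_mem : ∀ (i : Int), PySem.Int.mod i 40 ∈ PySem.List.pyRange 0 40 1 := by
  intro i
  rw [PySem.List.mem_pyRange_one, PySem.Int.mod_eq_emod_of_pos (by norm_num : (0:Int) < 40)]
  exact ⟨Int.emod_nonneg i (by norm_num), Int.emod_lt_of_pos i (by norm_num)⟩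

-- swapping the two scans: the 40-bucket sum of per-bucket counts is the plain match count
theorem score_sum (v : Int → Int) (L : List (Int × Int)) :
    ((PySem.List.pyRange 0 40 1).map
        (fun r => ((L.countP (fun ia => (PySem.Int.mod ia.1 40, ia.2) == (r, v r))) : Int))).sum
      = ((L.countP (fun ia => decide (v (PySem.Int.mod ia.1 40) = ia.2))) : Int) := by
  induction L with
  | nil => simp
  | cons x L ih =>
    simp only [List.countP_cons]
    push_cast
    rw [PySem.List.sum_map_add_int, ih]
    rw [show ((PySem.List.pyRange 0 40 1).map
          (fun r => if ((PySem.Int.mod x.1 40, x.2) == ((r : Int), v r)) = true then (1:Int) else 0))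
        = (PySem.List.pyRange 0 40 1).map
          (fun r => if ((PySem.Int.mod x.1 40, x.2) : Int × Int) = (r, v r) then (1:Int) else 0) from by
      apply List.map_congr_left; intro r _; simp [beq_iff_eq]]
    rw [sum_ind (PySem.List.pyRange 0 40 1) v (PySem.Int.mod x.1 40) x.2
      (PySem.List.nodup_pyRange_one 0 40) (mod40_mem x.1)]
    by_cases h : v (PySem.Int.mod x.1 40) = x.2 <;> simp [eq_comm]

-- each pattern's histogram score equals the modular match count cnt
theorem scoreOf_eq_cnt (answers : List Int) (p : List Int) (hp : 0 < p.length)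
    (hdvd : (p.length : Int) ∣ 40) :
    scoreOf (histOf answers) p = cnt p 0 answers := by
  unfold scoreOf
  rw [PySem.List.foldl_add]
  simp only [hist_getD, zero_add]
  rw [score_sum (fun r => PySem.List.pyGetD p (PySem.Int.mod r (PySem.List.len p)) 0)
    (PySem.List.enumerate answers)]
  unfold cnt
  congr 1
  apply List.countP_congr
  intro ia _
  have hlp : (0:Int) < (p.length : Int) := by exact_mod_cast hp
  have hmod : PySem.Int.mod (ia.1 % 40) ((p.length : Int))
      = PySem.Int.mod ia.1 ((p.length : Int)) := by
    rw [PySem.Int.mod_eq_emod_of_pos hlp, PySem.Int.mod_eq_emod_of_pos hlp,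
      Int.emod_emod_of_dvd _ hdvd]
  simp [hmod]

-- ===== A-side tail lemmas =====

theorem sorted123 (a b c : Int) :
    PySem.List.sorted2 [((1:Int),a),(2,b),(3,c)] (·.1) (·.2) = [(1,a),(2,b),(3,c)] := by
  simp [PySem.List.sorted2, PySem.List.insertBy]

theorem getD1 (a b c : Int) : (PySem.Dict.ofList [((1:Int),a),(2,b),(3,c)]).getD 1 0 = a := rfl
theorem getD2 (a b c : Int) : (PySem.Dict.ofList [((1:Int),a),(2,b),(3,c)]).getD 2 0 = b := rfl
theorem getD3 (a b c : Int) : (PySem.Dict.ofList [((1:Int),a),(2,b),(3,c)]).getD 3 0 = c := rfl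

set_option maxHeartbeats 2000000 in
theorem main_eq (answers : List Int) (hpre : answers.length ≤ 10000) :
    solution answers = solution_alt answers := by
  simp only [solution, solution_alt]
  rw [show (((PySem.Dict.empty.insert 1 0).insert 2 0).insert (3:Int) (0:Int)) = PySem.Dict.mk [(1,0),(2,0),(3,0)] from rfl]
  rw [show ∀ d0 : PySem.Dict Int Int, (PySem.List.pyRange 0 (PySem.List.len answers) 1).foldl
      (fun t i => tallyStep (PySem.List.pyRepeat [1,2,3,4,5] 2000)
        (PySem.List.pyRepeat [2,1,2,3,2,4,2,5] 1300)
        (PySem.List.pyRepeat [3,3,1,1,2,2,4,4,5,5] 1000) t i (PySem.List.pyGetD answers i 0)) d0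
    = (PySem.List.enumerate answers ((0:Nat) : Int)).foldl
      (fun t ia => tallyStep (PySem.List.pyRepeat [1,2,3,4,5] 2000)
        (PySem.List.pyRepeat [2,1,2,3,2,4,2,5] 1300)
        (PySem.List.pyRepeat [3,3,1,1,2,2,4,4,5,5] 1000) t ia.1 ia.2) d0 from
    fun d0 => by rw [show ((0:Nat):Int) = (0:Int) from rfl,
      PySem.List.enumerate_eq_map_pyRange answers 0, List.foldl_map]]
  rw [loopA answers 0 0 0 0 (by omega)]
  rw [show PySem.Dict.items (PySem.Dict.mk [((1:Int), (0:Int) + cnt [1,2,3,4,5] ((0:Nat):Int) answers),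
      (2, 0 + cnt [2,1,2,3,2,4,2,5] ((0:Nat):Int) answers),
      (3, 0 + cnt [3,3,1,1,2,2,4,4,5,5] ((0:Nat):Int) answers)])
    = [((1:Int), (0:Int) + cnt [1,2,3,4,5] ((0:Nat):Int) answers),
      (2, 0 + cnt [2,1,2,3,2,4,2,5] ((0:Nat):Int) answers),
      (3, 0 + cnt [3,3,1,1,2,2,4,4,5,5] ((0:Nat):Int) answers)] from rfl]
  rw [sorted123]
  simp only [List.map, getD1, getD2, getD3, Nat.cast_zero, zero_add]
  simp only [scoreOf_eq_cnt answers [1,2,3,4,5] (by norm_num) (by norm_num),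
    scoreOf_eq_cnt answers [2,1,2,3,2,4,2,5] (by norm_num) (by norm_num),
    scoreOf_eq_cnt answers [3,3,1,1,2,2,4,4,5,5] (by norm_num) (by norm_num)]
  generalize cnt [1,2,3,4,5] 0 answers = c1
  generalize cnt [2,1,2,3,2,4,2,5] 0 answers = c2
  generalize cnt [3,3,1,1,2,2,4,4,5,5] 0 answers = c3
  simp only [PySem.List.max?_id_cons, List.foldl, Option.getD_some]
  rw [show PySem.List.pyRange 0 3 1 = [0, 1, 2] from by decide]
  simp only [List.filter_cons, List.filter_nil]
  simp only [show PySem.List.pyGetD [c1, c2, c3] (0:Int) 0 = c1 from rfl,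
    show PySem.List.pyGetD [c1, c2, c3] (1:Int) 0 = c2 from rfl,
    show PySem.List.pyGetD [c1, c2, c3] (2:Int) 0 = c3 from rfl]
  split_ifs <;>
    (try simp only [decide_eq_true_eq] at *) <;>
    first
      | rfl
      | omega

-- ===== VERDICT (by name: the statement is the Claim_ definition above) =====
theorem solution_spec : Claim_equal_solution := by
  intro answers _ hpre
  exact main_eq answers hpre
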